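-- pv_equiv track=rewrite | github.com/big-comm/ashyterm | src/ashyterm/terminal/url_handler.py | _get_last_pipeline_segment
-- ===== SOURCE A (Python) =====
-- def _get_last_pipeline_segment(command_part: str) -> str:
--     """Get the last segment of a pipeline command."""
--     parts: list[str] = []
--     current: list[str] = []
--     for char in command_part:
--         if char in "|;&":
--             if current:
--                 parts.append("".join(current).strip())
--                 current = []
--         else:
--             current.append(char)
--     if current:
--         parts.append("".join(current).strip())
--
--     for part in reversed(parts):
--         if part:
--             return part
--     return command_part
-- ===== SOURCE B (Python) =====
-- def _scan_backward(command_part: str):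
--     """Scan from the end; return the last non-empty stripped segment, or None."""
--     seg = []
--     for ch in reversed(command_part):
--         if ch in "|;&":
--             s = "".join(reversed(seg)).strip()
--             if s:
--                 return s
--             seg = []
--         else:
--             seg.append(ch)
--     s = "".join(reversed(seg)).strip()
--     if s:
--         return s
--     return None
--
-- def _get_last_pipeline_segment(command_part: str) -> str:
--     found = _scan_backward(command_part)
--     return found if found is not None else command_part
-- ===== Notes on version B (the rewrite author's own statement) =====
-- stated objective: alternative
-- what changed: B scans the string backward from the end, accumulating the current segment and returning the first non-empty stripped segment immediately, instead of A's forward pass that builds the full list of stripped segments and then scans it in reverse.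
import Mathlib
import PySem

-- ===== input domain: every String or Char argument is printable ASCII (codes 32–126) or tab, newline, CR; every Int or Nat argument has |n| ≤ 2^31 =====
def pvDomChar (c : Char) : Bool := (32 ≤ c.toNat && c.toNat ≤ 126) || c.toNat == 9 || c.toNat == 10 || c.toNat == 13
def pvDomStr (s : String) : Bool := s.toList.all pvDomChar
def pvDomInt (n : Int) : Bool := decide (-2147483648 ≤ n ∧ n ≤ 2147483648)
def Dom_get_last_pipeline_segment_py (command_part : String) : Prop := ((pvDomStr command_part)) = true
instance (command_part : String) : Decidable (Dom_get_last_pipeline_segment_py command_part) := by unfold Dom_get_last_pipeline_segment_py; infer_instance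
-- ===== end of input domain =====

-- ===== PORT A =====
-- one honest line: B replaces A's forward build-all-segments-then-reverse-scan by a single
-- backward scan with early exit (objective: alternative; same asymptotic cost).
def pvIsDelim (c : Char) : Bool := c == '|' || c == ';' || c == '&'

def get_last_pipeline_segment_py (command_part : String) : String :=
  let st := command_part.toList.foldl
    (fun (st : List String × List Char) c =>
      if pvIsDelim c then
        if st.2 ≠ [] then (st.1 ++ [PySem.Str.strip (String.mk st.2)], []) else st
      else (st.1, st.2 ++ [c]))
    ([], [])
  let parts := if st.2 ≠ [] then st.1 ++ [PySem.Str.strip (String.mk st.2)] else st.1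
  match parts.reverse.find? (fun p => !(p == "")) with
  | some p => p
  | none => command_part

-- ===== PORT B =====
-- backward scan: `buf` collects the current segment's chars in scan (reversed) order and is
-- reversed before stripping; returns the first non-empty stripped segment, none if none exists.
def pvScanBack : List Char → List Char → Option String
  | [], buf =>
    let s := PySem.Str.strip (String.mk buf.reverse)
    if s ≠ "" then some s else none
  | c :: rest, buf =>
    if pvIsDelim c then
      let s := PySem.Str.strip (String.mk buf.reverse)
      if s ≠ "" then some s else pvScanBack rest []
    else pvScanBack rest (buf ++ [c])

def get_last_pipeline_segment_py_alt (command_part : String) : String :=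
  match pvScanBack command_part.toList.reverse [] with
  | some p => p
  | none => command_part

-- ===== PRECONDITION & SPEC =====
def Spec_get_last_pipeline_segment_py (command_part : String) (out : String) : Prop := out = get_last_pipeline_segment_py_alt command_part
instance (command_part : String) (out : String) : Decidable (Spec_get_last_pipeline_segment_py command_part out) := by unfold Spec_get_last_pipeline_segment_py; infer_instance

-- ===== CLAIM (what is proved, stated in full; the proofs are below) =====
def Claim_equal_get_last_pipeline_segment_py : Prop := ∀ (command_part : String), Dom_get_last_pipeline_segment_py command_part → Spec_get_last_pipeline_segment_py command_part (get_last_pipeline_segment_py command_part)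

-- ===== LEMMAS AND PROOFS =====

-- abbreviations used only by the proofs
def pvStep (st : List String × List Char) (c : Char) : List String × List Char :=
  if pvIsDelim c then
    if st.2 ≠ [] then (st.1 ++ [PySem.Str.strip (String.mk st.2)], []) else st
  else (st.1, st.2 ++ [c])

def pvFinish (st : List String × List Char) : List String :=
  if st.2 ≠ [] then st.1 ++ [PySem.Str.strip (String.mk st.2)] else st.1

-- A's optional answer: last non-empty stripped segment of l
def pvAnsA (l : List Char) : Option String :=
  (pvFinish (l.foldl pvStep ([], []))).reverse.find? (fun p => !(p == ""))

lemma pvStrip_nil : PySem.Str.strip (String.mk []) = "" := by decide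

-- a delimiter-free suffix just extends the current segment
lemma pvFoldl_free (buf : List Char) (h : ∀ c ∈ buf, pvIsDelim c = false) :
    ∀ (p : List String) (cur : List Char),
      buf.foldl pvStep (p, cur) = (p, cur ++ buf) := by
  induction buf with
  | nil => intro p cur; simp
  | cons c rest ih =>
    intro p cur
    have hc : pvIsDelim c = false := h c (by simp)
    have hrest : ∀ c ∈ rest, pvIsDelim c = false := fun c hm => h c (by simp [hm])
    simp [List.foldl_cons, pvStep, hc, ih hrest]

-- after a delimiter the accumulated parts are exactly pvFinish of the state
lemma pvStep_delim (st : List String × List Char) (c : Char) (hc : pvIsDelim c = true) :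
    pvStep st c = (pvFinish st, []) := by
  obtain ⟨p, cur⟩ := st
  by_cases h2 : cur = [] <;> simp [pvStep, pvFinish, hc, h2]

-- main invariant: the backward scan with pending buffer buf computes A's answer on l ++ buf
lemma pvScanBack_eq (l : List Char) :
    ∀ buf, (∀ c ∈ buf, pvIsDelim c = false) →
      pvScanBack l.reverse buf = pvAnsA (l ++ buf.reverse) := by
  induction l using List.reverseRecOn with
  | nil =>
    intro buf hbuf
    have hbuf' : ∀ c ∈ buf.reverse, pvIsDelim c = false :=
      fun c h => hbuf c (List.mem_reverse.mp h)
    have hfold := pvFoldl_free buf.reverse hbuf' [] []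
    simp only [List.reverse_nil, List.nil_append]
    unfold pvAnsA
    rw [hfold]
    by_cases hb : buf = []
    · simp [hb, pvScanBack, pvFinish, pvStrip_nil]
    · have hbne : buf.reverse ≠ [] := by simp [hb]
      by_cases hs : PySem.Str.strip (String.mk buf.reverse) = "" <;>
        simp [pvScanBack, pvFinish, hbne, hs]
  | append_singleton l c ih =>
    intro buf hbuf
    simp only [List.reverse_append, List.reverse_singleton, List.singleton_append]
    by_cases hc : pvIsDelim c = true
    · have hbuf' : ∀ d ∈ buf.reverse, pvIsDelim d = false :=
        fun d h => hbuf d (List.mem_reverse.mp h)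
      unfold pvAnsA
      rw [List.append_assoc, List.foldl_append, List.foldl_append]
      simp only [List.foldl_cons, List.foldl_nil]
      rw [pvStep_delim _ _ hc, pvFoldl_free buf.reverse hbuf', List.nil_append]
      by_cases hs : PySem.Str.strip (String.mk buf.reverse) = ""
      · have hbase : pvScanBack l.reverse [] = pvAnsA l := by
          simpa using ih [] (by simp)
        unfold pvAnsA at hbase
        by_cases hb : buf = []
        · simp [hb, pvScanBack, hc, hbase, pvFinish, pvStrip_nil]
        · have hbne : buf.reverse ≠ [] := by simp [hb]
          simp [pvScanBack, hc, hs, hbase, pvFinish, hbne]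
      · have hbne : buf.reverse ≠ [] := by
          intro h; rw [h] at hs; exact hs pvStrip_nil
        simp [pvScanBack, hc, hs, pvFinish, hbne]
    · have hc' : pvIsDelim c = false := by simpa using hc
      have hfree : ∀ d ∈ buf ++ [c], pvIsDelim d = false := by
        intro d hd
        rcases List.mem_append.mp hd with h | h
        · exact hbuf d h
        · rw [List.mem_singleton.mp h]; exact hc'
      have := ih (buf ++ [c]) hfree
      simpa [pvScanBack, hc', List.append_assoc] using this

-- ===== VERDICT (by name: the statement is the Claim_ definition above) =====
theorem get_last_pipeline_segment_py_spec : Claim_equal_get_last_pipeline_segment_py := by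
  intro s _hDom
  unfold Spec_get_last_pipeline_segment_py get_last_pipeline_segment_py get_last_pipeline_segment_py_alt
  have h := pvScanBack_eq s.toList [] (by simp)
  simp only [List.reverse_nil, List.append_nil] at h
  rw [h]
  rfl
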